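-- pv_equiv track=rewrite | github.com/huannv-sys/test | app/core/vpn.py | format_connections
-- ===== SOURCE A (Python) =====
-- def format_connections(connections):
--     """Format connection data for the API response"""
--     formatted_connections = []
--
--     for conn in connections:
--         formatted_conn = {}
--
--         # Common fields for all VPN types
--         formatted_conn['type'] = conn.get('type', '')
--         formatted_conn['service'] = conn.get('service', '')
--
--         # Handle different naming conventions in RouterOS API
--         if 'name' in conn:
--             formatted_conn['name'] = conn['name']
--         elif 'interface' in conn:
--             formatted_conn['name'] = conn['interface']
--
--         if 'uptime' in conn:
--             formatted_conn['uptime'] = conn['uptime']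
--
--         # User identification
--         if 'user' in conn:
--             formatted_conn['user'] = conn['user']
--         elif 'username' in conn:
--             formatted_conn['user'] = conn['username']
--         elif 'name' in conn:
--             formatted_conn['user'] = conn['name']
--
--         # IP addresses
--         if 'address' in conn:
--             formatted_conn['address'] = conn['address']
--         elif 'remote-address' in conn:
--             formatted_conn['address'] = conn['remote-address']
--         elif 'remote_address' in conn:
--             formatted_conn['address'] = conn['remote_address']
--
--         # Add local address if available
--         if 'local-address' in conn:
--             formatted_conn['local_address'] = conn['local-address']
--         elif 'local_address' in conn:
--             formatted_conn['local_address'] = conn['local_address']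
--
--         # Encryption details
--         if 'encoding' in conn:
--             formatted_conn['encoding'] = conn['encoding']
--
--         if 'cipher' in conn:
--             formatted_conn['cipher'] = conn['cipher']
--
--         # Add other fields based on their presence
--         for key, value in conn.items():
--             if key not in ['type', 'service', 'name', 'interface', 'uptime', 'user', 'username',
--                           'address', 'remote-address', 'remote_address', 'local-address', 'local_address',
--                           'encoding', 'cipher']:
--                 # Convert kebab-case to snake_case for consistent API naming
--                 new_key = key.replace('-', '_')
--                 formatted_conn[new_key] = value
--
--         formatted_connections.append(formatted_conn)
--
--     return formatted_connections
-- ===== SOURCE B (Python) =====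
-- # Inverse mapping: classify each incoming key by role in ONE pass over the record,
-- # keeping the lowest-priority-number candidate per target, instead of probing the
-- # dict through hard-coded if/elif fallback chains.
-- ROLES = {
--     'type': (('type', 0),),
--     'service': (('service', 0),),
--     'name': (('name', 0), ('user', 2)),
--     'interface': (('name', 1),),
--     'uptime': (('uptime', 0),),
--     'user': (('user', 0),),
--     'username': (('user', 1),),
--     'address': (('address', 0),),
--     'remote-address': (('address', 1),),
--     'remote_address': (('address', 2),),
--     'local-address': (('local_address', 0),),
--     'local_address': (('local_address', 1),),
--     'encoding': (('encoding', 0),),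
--     'cipher': (('cipher', 0),),
-- }
--
-- TARGETS = ('type', 'service', 'name', 'uptime', 'user', 'address',
--            'local_address', 'encoding', 'cipher')
-- ALWAYS = ('type', 'service')
--
--
-- def format_connections(connections):
--     result = []
--     for conn in connections:
--         best = {}      # target -> (priority, value); lower priority wins
--         extras = []    # residual keys, already snake_cased, in record order
--         for key, value in conn.items():
--             roles = ROLES.get(key)
--             if roles is None:
--                 extras.append((key.replace('-', '_'), value))
--             else:
--                 for target, prio in roles:
--                     if target not in best or prio < best[target][0]:
--                         best[target] = (prio, value)
--         fc = {}
--         for t in TARGETS: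
--             if t in best:
--                 fc[t] = best[t][1]
--             elif t in ALWAYS:
--                 fc[t] = ''
--         for k, v in extras:
--             fc[k] = v
--         result.append(fc)
--     return result
-- ===== Notes on version B (the rewrite author's own statement) =====
-- stated objective: alternative
-- what changed: Instead of probing each dict through hard-coded if/elif fallback chains, B makes a single classification pass over each record's items, mapping every key through an inverted role table (source key -> (target, priority)) and keeping the lowest-priority candidate per target while collecting residual keys, then emits the targets in fixed order.
import Mathlib
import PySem

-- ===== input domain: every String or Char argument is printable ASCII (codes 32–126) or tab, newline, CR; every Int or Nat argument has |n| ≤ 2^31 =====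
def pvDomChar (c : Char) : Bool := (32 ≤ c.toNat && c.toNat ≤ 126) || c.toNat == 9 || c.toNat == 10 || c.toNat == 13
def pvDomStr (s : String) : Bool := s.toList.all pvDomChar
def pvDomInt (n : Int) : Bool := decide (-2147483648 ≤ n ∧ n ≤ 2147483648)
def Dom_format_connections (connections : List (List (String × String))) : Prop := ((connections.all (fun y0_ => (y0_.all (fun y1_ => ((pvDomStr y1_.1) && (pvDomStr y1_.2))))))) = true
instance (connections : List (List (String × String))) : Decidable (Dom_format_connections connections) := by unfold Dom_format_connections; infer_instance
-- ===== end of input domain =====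

-- B replaces A's dict-probing if/elif fallback chains by a single classification pass over each
-- record: every key is looked up in an inverted role map (source -> (target, priority)), the
-- best-priority candidate per target is kept and residual keys are collected in the same pass;
-- the output is then emitted in the fixed target order. Objective: simpler structure, same cost.

-- ===== PORT A =====
-- A's 14-name skip list, written literally
def pvSkipA : List String :=
  ["type", "service", "name", "interface", "uptime", "user", "username",
   "address", "remote-address", "remote_address", "local-address", "local_address",
   "encoding", "cipher"]

-- one iteration of A's outer loop: the if/elif chains, then the residual items() loop
def pvFormatOneA (conn : PySem.Dict String String) : PySem.Dict String String :=
  let fc : PySem.Dict String String := PySem.Dict.empty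
  let fc := fc.insert "type" (conn.getD "type" "")
  let fc := fc.insert "service" (conn.getD "service" "")
  let fc := match conn.get? "name" with
    | some v => fc.insert "name" v
    | none => match conn.get? "interface" with
      | some v => fc.insert "name" v
      | none => fc
  let fc := match conn.get? "uptime" with
    | some v => fc.insert "uptime" v
    | none => fc
  let fc := match conn.get? "user" with
    | some v => fc.insert "user" v
    | none => match conn.get? "username" with
      | some v => fc.insert "user" v
      | none => match conn.get? "name" with
        | some v => fc.insert "user" v
        | none => fc
  let fc := match conn.get? "address" with
    | some v => fc.insert "address" v
    | none => match conn.get? "remote-address" with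
      | some v => fc.insert "address" v
      | none => match conn.get? "remote_address" with
        | some v => fc.insert "address" v
        | none => fc
  let fc := match conn.get? "local-address" with
    | some v => fc.insert "local_address" v
    | none => match conn.get? "local_address" with
      | some v => fc.insert "local_address" v
      | none => fc
  let fc := match conn.get? "encoding" with
    | some v => fc.insert "encoding" v
    | none => fc
  let fc := match conn.get? "cipher" with
    | some v => fc.insert "cipher" v
    | none => fc
  conn.items.foldl (fun fc kv =>
    if pvSkipA.contains kv.1 then fc
    else fc.insert (PySem.Str.replace kv.1 "-" "_") kv.2) fc

def format_connections (connections : List (List (String × String))) : List (List (String × String)) :=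
  connections.foldl (fun acc conn => acc ++ [(pvFormatOneA (PySem.Dict.mk conn)).items]) []

-- ===== PORT B =====
-- B's inverted role map: source key -> list of (target, priority); lower priority wins
def pvRoles : PySem.Dict String (List (String × Int)) :=
  PySem.Dict.mk
    [("type", [("type", 0)]),
     ("service", [("service", 0)]),
     ("name", [("name", 0), ("user", 2)]),
     ("interface", [("name", 1)]),
     ("uptime", [("uptime", 0)]),
     ("user", [("user", 0)]),
     ("username", [("user", 1)]),
     ("address", [("address", 0)]),
     ("remote-address", [("address", 1)]),
     ("remote_address", [("address", 2)]),
     ("local-address", [("local_address", 0)]),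
     ("local_address", [("local_address", 1)]),
     ("encoding", [("encoding", 0)]),
     ("cipher", [("cipher", 0)])]

def pvTargets : List String :=
  ["type", "service", "name", "uptime", "user", "address", "local_address", "encoding", "cipher"]

def pvAlways : List String := ["type", "service"]

-- one step of B's classification pass: state = (best candidates per target, residual extras)
def pvStepB (st : PySem.Dict String (Int × String) × List (String × String))
    (kv : String × String) : PySem.Dict String (Int × String) × List (String × String) :=
  match pvRoles.get? kv.1 with
  | none => (st.1, st.2 ++ [(PySem.Str.replace kv.1 "-" "_", kv.2)])
  | some roles =>
      (roles.foldl (fun best tp =>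
        match best.get? tp.1 with
        | none => best.insert tp.1 (tp.2, kv.2)
        | some cur => if tp.2 < cur.1 then best.insert tp.1 (tp.2, kv.2) else best) st.1,
       st.2)

def pvFormatOneB (conn : PySem.Dict String String) : PySem.Dict String String :=
  let st := conn.items.foldl pvStepB (PySem.Dict.empty, [])
  let fc := pvTargets.foldl (fun fc t =>
      match st.1.get? t with
      | some pv => fc.insert t pv.2
      | none => if pvAlways.contains t then fc.insert t "" else fc) PySem.Dict.empty
  st.2.foldl (fun fc kv => fc.insert kv.1 kv.2) fc

def format_connections_alt (connections : List (List (String × String))) : List (List (String × String)) :=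
  connections.foldl (fun acc conn => acc ++ [(pvFormatOneB (PySem.Dict.mk conn)).items]) []


-- ===== PRECONDITION & SPEC =====
def Spec_format_connections (connections : List (List (String × String))) (out : List (List (String × String))) : Prop := out = format_connections_alt connections
instance (connections : List (List (String × String))) (out : List (List (String × String))) : Decidable (Spec_format_connections connections out) := by unfold Spec_format_connections; infer_instance

-- ===== CLAIM (what is proved, stated in full; the proofs are below) =====
def Claim_equal_format_connections : Prop := ∀ (connections : List (List (String × String))), Dom_format_connections connections → Spec_format_connections connections (format_connections connections)

-- ===== LEMMAS AND PROOFS =====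

def pvChain (conn : PySem.Dict String String) : List (String × Int) → Option (Int × String)
  | [] => none
  | (s, p) :: rest => match conn.get? s with
    | some v => some (p, v)
    | none => pvChain conn rest

def pvSrcs : String → List (String × Int)
  | "type" => [("type", 0)]
  | "service" => [("service", 0)]
  | "name" => [("name", 0), ("interface", 1)]
  | "uptime" => [("uptime", 0)]
  | "user" => [("user", 0), ("username", 1), ("name", 2)]
  | "address" => [("address", 0), ("remote-address", 1), ("remote_address", 2)]
  | "local_address" => [("local-address", 0), ("local_address", 1)]
  | "encoding" => [("encoding", 0)]
  | "cipher" => [("cipher", 0)]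
  | _ => []

lemma pvGet_mk_append (l : List (String × String)) (k v s : String) :
    (PySem.Dict.mk (l ++ [(k, v)])).get? s =
      ((PySem.Dict.mk l).get? s).or (if k == s then some v else none) := by
  induction l with
  | nil => simp [PySem.Dict.get?_mk_cons]; split <;> rfl
  | cons p t ih =>
      obtain ⟨a, b⟩ := p
      rw [List.cons_append, PySem.Dict.get?_mk_cons, PySem.Dict.get?_mk_cons]
      split
      · rfl
      · exact ih

lemma pvRoles_get?_eq_none (k : String) (h : ¬ k ∈ pvSkipA) : pvRoles.get? k = none := by
  simp only [pvSkipA, List.mem_cons, List.not_mem_nil, or_false, not_or] at h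
  obtain ⟨h1, h2, h3, h4, h5, h6, h7, h8, h9, h10, h11, h12, h13, h14⟩ := h
  simp [pvRoles, beq_iff_eq, Ne.symm h1, Ne.symm h2, Ne.symm h3,
    Ne.symm h4, Ne.symm h5, Ne.symm h6, Ne.symm h7, Ne.symm h8, Ne.symm h9, Ne.symm h10,
    Ne.symm h11, Ne.symm h12, Ne.symm h13, Ne.symm h14, PySem.Dict.get?]

lemma pvChain_append_frame (t : List (String × String)) (k v : String)
    (ss : List (String × Int)) (hk : ¬ k ∈ pvSkipA) (hss : ∀ p ∈ ss, p.1 ∈ pvSkipA) :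
    pvChain (PySem.Dict.mk (t ++ [(k, v)])) ss = pvChain (PySem.Dict.mk t) ss := by
  induction ss with
  | nil => rfl
  | cons p rest ih =>
      obtain ⟨s, pr⟩ := p
      have hs : k ≠ s := fun he => hk (he ▸ hss (s, pr) (List.mem_cons_self))
      simp only [pvChain, pvGet_mk_append, beq_iff_eq, if_neg hs, Option.or_none]
      cases (PySem.Dict.mk t).get? s
      · exact ih (fun q hq => hss q (List.mem_cons_of_mem _ hq))
      · rfl

set_option maxHeartbeats 2000000 in
lemma pvInv (l : List (String × String)) :
    (∀ t ∈ pvTargets, (l.foldl pvStepB (PySem.Dict.empty, [])).1.get? t = pvChain (PySem.Dict.mk l) (pvSrcs t)) ∧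
    (l.foldl pvStepB (PySem.Dict.empty, [])).2 = l.foldl (fun acc kv => if pvSkipA.contains kv.1 then acc
      else acc ++ [(PySem.Str.replace kv.1 "-" "_", kv.2)]) [] := by
  induction l using List.reverseRecOn with
  | nil =>
      constructor
      · intro t ht; fin_cases ht <;> rfl
      · rfl
  | append_singleton t kv ih =>
      obtain ⟨k, v⟩ := kv
      obtain ⟨ih1, ih2⟩ := ih
      have e1 := ih1 "type" (by decide)
      have e2 := ih1 "service" (by decide)
      have e3 := ih1 "name" (by decide)
      have e4 := ih1 "uptime" (by decide)
      have e5 := ih1 "user" (by decide)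
      have e6 := ih1 "address" (by decide)
      have e7 := ih1 "local_address" (by decide)
      have e8 := ih1 "encoding" (by decide)
      have e9 := ih1 "cipher" (by decide)
      rw [List.foldl_append, List.foldl_append]
      by_cases hk : k ∈ pvSkipA
      case neg =>
        have hr := pvRoles_get?_eq_none k hk
        have hc : pvSkipA.contains k = false := by simpa using hk
        constructor
        · intro tt htt
          have hss : ∀ p ∈ pvSrcs tt, p.1 ∈ pvSkipA := by fin_cases htt <;> decide
          rw [List.foldl_cons, List.foldl_nil]
          simp only [pvStepB, hr]
          rw [ih1 tt htt, pvChain_append_frame t k v _ hk hss]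
        · rw [List.foldl_cons, List.foldl_nil, List.foldl_cons, List.foldl_nil]
          simp only [pvStepB, hr, ih2, hc, Bool.false_eq_true, if_false]
      case pos =>
      simp only [pvSkipA, List.mem_cons, List.not_mem_nil, or_false] at hk
      rcases hk with rfl | rfl | rfl | rfl | rfl | rfl | rfl | rfl | rfl | rfl | rfl | rfl | rfl | rfl
      · -- k = "type"
        refine ⟨?_, by simp [pvStepB, pvRoles, PySem.Dict.get?_mk_cons, pvSkipA, ih2]⟩
        intro tt htt
        rcases hx0 : (PySem.Dict.mk t).get? "type" <;> fin_cases htt <;>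
          simp [pvStepB, pvRoles, PySem.Dict.get?_mk_cons, pvSrcs, pvChain, pvGet_mk_append,
            PySem.Dict.get?_insert, e1, e2, e3, e4, e5, e6, e7, e8, e9, hx0]
      · -- k = "service"
        refine ⟨?_, by simp [pvStepB, pvRoles, PySem.Dict.get?_mk_cons, pvSkipA, ih2]⟩
        intro tt htt
        rcases hx0 : (PySem.Dict.mk t).get? "service" <;> fin_cases htt <;>
          simp [pvStepB, pvRoles, PySem.Dict.get?_mk_cons, pvSrcs, pvChain, pvGet_mk_append,
            PySem.Dict.get?_insert, e1, e2, e3, e4, e5, e6, e7, e8, e9, hx0]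
      · -- k = "name"
        refine ⟨?_, by simp [pvStepB, pvRoles, PySem.Dict.get?_mk_cons, pvSkipA, ih2]⟩
        intro tt htt
        rcases hx0 : (PySem.Dict.mk t).get? "name" <;>
        rcases hx1 : (PySem.Dict.mk t).get? "interface" <;>
        rcases hx2 : (PySem.Dict.mk t).get? "user" <;>
        rcases hx3 : (PySem.Dict.mk t).get? "username" <;> fin_cases htt <;>
          simp [pvStepB, pvRoles, PySem.Dict.get?_mk_cons, pvSrcs, pvChain, pvGet_mk_append,
            PySem.Dict.get?_insert, e1, e2, e3, e4, e5, e6, e7, e8, e9, hx0, hx1, hx2, hx3]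
      · -- k = "interface"
        refine ⟨?_, by simp [pvStepB, pvRoles, PySem.Dict.get?_mk_cons, pvSkipA, ih2]⟩
        intro tt htt
        rcases hx0 : (PySem.Dict.mk t).get? "name" <;>
        rcases hx1 : (PySem.Dict.mk t).get? "interface" <;> fin_cases htt <;>
          simp [pvStepB, pvRoles, PySem.Dict.get?_mk_cons, pvSrcs, pvChain, pvGet_mk_append,
            PySem.Dict.get?_insert, e1, e2, e3, e4, e5, e6, e7, e8, e9, hx0, hx1]
      · -- k = "uptime"
        refine ⟨?_, by simp [pvStepB, pvRoles, PySem.Dict.get?_mk_cons, pvSkipA, ih2]⟩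
        intro tt htt
        rcases hx0 : (PySem.Dict.mk t).get? "uptime" <;> fin_cases htt <;>
          simp [pvStepB, pvRoles, PySem.Dict.get?_mk_cons, pvSrcs, pvChain, pvGet_mk_append,
            PySem.Dict.get?_insert, e1, e2, e3, e4, e5, e6, e7, e8, e9, hx0]
      · -- k = "user"
        refine ⟨?_, by simp [pvStepB, pvRoles, PySem.Dict.get?_mk_cons, pvSkipA, ih2]⟩
        intro tt htt
        rcases hx0 : (PySem.Dict.mk t).get? "user" <;>
        rcases hx1 : (PySem.Dict.mk t).get? "username" <;>
        rcases hx2 : (PySem.Dict.mk t).get? "name" <;> fin_cases htt <;>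
          simp [pvStepB, pvRoles, PySem.Dict.get?_mk_cons, pvSrcs, pvChain, pvGet_mk_append,
            PySem.Dict.get?_insert, e1, e2, e3, e4, e5, e6, e7, e8, e9, hx0, hx1, hx2]
      · -- k = "username"
        refine ⟨?_, by simp [pvStepB, pvRoles, PySem.Dict.get?_mk_cons, pvSkipA, ih2]⟩
        intro tt htt
        rcases hx0 : (PySem.Dict.mk t).get? "user" <;>
        rcases hx1 : (PySem.Dict.mk t).get? "username" <;>
        rcases hx2 : (PySem.Dict.mk t).get? "name" <;> fin_cases htt <;>
          simp [pvStepB, pvRoles, PySem.Dict.get?_mk_cons, pvSrcs, pvChain, pvGet_mk_append,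
            PySem.Dict.get?_insert, e1, e2, e3, e4, e5, e6, e7, e8, e9, hx0, hx1, hx2]
      · -- k = "address"
        refine ⟨?_, by simp [pvStepB, pvRoles, PySem.Dict.get?_mk_cons, pvSkipA, ih2]⟩
        intro tt htt
        rcases hx0 : (PySem.Dict.mk t).get? "address" <;>
        rcases hx1 : (PySem.Dict.mk t).get? "remote-address" <;>
        rcases hx2 : (PySem.Dict.mk t).get? "remote_address" <;> fin_cases htt <;>
          simp [pvStepB, pvRoles, PySem.Dict.get?_mk_cons, pvSrcs, pvChain, pvGet_mk_append,
            PySem.Dict.get?_insert, e1, e2, e3, e4, e5, e6, e7, e8, e9, hx0, hx1, hx2]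
      · -- k = "remote-address"
        refine ⟨?_, by simp [pvStepB, pvRoles, PySem.Dict.get?_mk_cons, pvSkipA, ih2]⟩
        intro tt htt
        rcases hx0 : (PySem.Dict.mk t).get? "address" <;>
        rcases hx1 : (PySem.Dict.mk t).get? "remote-address" <;>
        rcases hx2 : (PySem.Dict.mk t).get? "remote_address" <;> fin_cases htt <;>
          simp [pvStepB, pvRoles, PySem.Dict.get?_mk_cons, pvSrcs, pvChain, pvGet_mk_append,
            PySem.Dict.get?_insert, e1, e2, e3, e4, e5, e6, e7, e8, e9, hx0, hx1, hx2]
      · -- k = "remote_address"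
        refine ⟨?_, by simp [pvStepB, pvRoles, PySem.Dict.get?_mk_cons, pvSkipA, ih2]⟩
        intro tt htt
        rcases hx0 : (PySem.Dict.mk t).get? "address" <;>
        rcases hx1 : (PySem.Dict.mk t).get? "remote-address" <;>
        rcases hx2 : (PySem.Dict.mk t).get? "remote_address" <;> fin_cases htt <;>
          simp [pvStepB, pvRoles, PySem.Dict.get?_mk_cons, pvSrcs, pvChain, pvGet_mk_append,
            PySem.Dict.get?_insert, e1, e2, e3, e4, e5, e6, e7, e8, e9, hx0, hx1, hx2]
      · -- k = "local-address"
        refine ⟨?_, by simp [pvStepB, pvRoles, PySem.Dict.get?_mk_cons, pvSkipA, ih2]⟩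
        intro tt htt
        rcases hx0 : (PySem.Dict.mk t).get? "local-address" <;>
        rcases hx1 : (PySem.Dict.mk t).get? "local_address" <;> fin_cases htt <;>
          simp [pvStepB, pvRoles, PySem.Dict.get?_mk_cons, pvSrcs, pvChain, pvGet_mk_append,
            PySem.Dict.get?_insert, e1, e2, e3, e4, e5, e6, e7, e8, e9, hx0, hx1]
      · -- k = "local_address"
        refine ⟨?_, by simp [pvStepB, pvRoles, PySem.Dict.get?_mk_cons, pvSkipA, ih2]⟩
        intro tt htt
        rcases hx0 : (PySem.Dict.mk t).get? "local-address" <;>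
        rcases hx1 : (PySem.Dict.mk t).get? "local_address" <;> fin_cases htt <;>
          simp [pvStepB, pvRoles, PySem.Dict.get?_mk_cons, pvSrcs, pvChain, pvGet_mk_append,
            PySem.Dict.get?_insert, e1, e2, e3, e4, e5, e6, e7, e8, e9, hx0, hx1]
      · -- k = "encoding"
        refine ⟨?_, by simp [pvStepB, pvRoles, PySem.Dict.get?_mk_cons, pvSkipA, ih2]⟩
        intro tt htt
        rcases hx0 : (PySem.Dict.mk t).get? "encoding" <;> fin_cases htt <;>
          simp [pvStepB, pvRoles, PySem.Dict.get?_mk_cons, pvSrcs, pvChain, pvGet_mk_append,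
            PySem.Dict.get?_insert, e1, e2, e3, e4, e5, e6, e7, e8, e9, hx0]
      · -- k = "cipher"
        refine ⟨?_, by simp [pvStepB, pvRoles, PySem.Dict.get?_mk_cons, pvSkipA, ih2]⟩
        intro tt htt
        rcases hx0 : (PySem.Dict.mk t).get? "cipher" <;> fin_cases htt <;>
          simp [pvStepB, pvRoles, PySem.Dict.get?_mk_cons, pvSrcs, pvChain, pvGet_mk_append,
            PySem.Dict.get?_insert, e1, e2, e3, e4, e5, e6, e7, e8, e9, hx0]

-- A's nine chain stages, named (defeq to the lets in pvFormatOneA)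
def pvA1 (conn fc : PySem.Dict String String) : PySem.Dict String String :=
  fc.insert "type" (conn.getD "type" "")
def pvA2 (conn fc : PySem.Dict String String) : PySem.Dict String String :=
  fc.insert "service" (conn.getD "service" "")
def pvA3 (conn fc : PySem.Dict String String) : PySem.Dict String String :=
  match conn.get? "name" with
  | some v => fc.insert "name" v
  | none => match conn.get? "interface" with
    | some v => fc.insert "name" v
    | none => fc
def pvA4 (conn fc : PySem.Dict String String) : PySem.Dict String String :=
  match conn.get? "uptime" with
  | some v => fc.insert "uptime" v
  | none => fc
def pvA5 (conn fc : PySem.Dict String String) : PySem.Dict String String :=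
  match conn.get? "user" with
  | some v => fc.insert "user" v
  | none => match conn.get? "username" with
    | some v => fc.insert "user" v
    | none => match conn.get? "name" with
      | some v => fc.insert "user" v
      | none => fc
def pvA6 (conn fc : PySem.Dict String String) : PySem.Dict String String :=
  match conn.get? "address" with
  | some v => fc.insert "address" v
  | none => match conn.get? "remote-address" with
    | some v => fc.insert "address" v
    | none => match conn.get? "remote_address" with
      | some v => fc.insert "address" v
      | none => fc
def pvA7 (conn fc : PySem.Dict String String) : PySem.Dict String String :=
  match conn.get? "local-address" with
  | some v => fc.insert "local_address" v
  | none => match conn.get? "local_address" with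
    | some v => fc.insert "local_address" v
    | none => fc
def pvA8 (conn fc : PySem.Dict String String) : PySem.Dict String String :=
  match conn.get? "encoding" with
  | some v => fc.insert "encoding" v
  | none => fc
def pvA9 (conn fc : PySem.Dict String String) : PySem.Dict String String :=
  match conn.get? "cipher" with
  | some v => fc.insert "cipher" v
  | none => fc

-- B's emit stage, named (defeq to the fold body of pvFormatOneB after the pvInv rewrite)
def pvStage (conn : PySem.Dict String String) (t : String) (fc : PySem.Dict String String) :
    PySem.Dict String String :=
  match pvChain conn (pvSrcs t) with
  | some pv => fc.insert t pv.2
  | none => if pvAlways.contains t then fc.insert t "" else fc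

lemma pvL1 (conn fc : PySem.Dict String String) : pvStage conn "type" fc = pvA1 conn fc := by
  cases h : conn.get? "type" <;>
    simp [pvStage, pvSrcs, pvChain, pvAlways, pvA1, h, PySem.Dict.getD_eq_get?_getD]
lemma pvL2 (conn fc : PySem.Dict String String) : pvStage conn "service" fc = pvA2 conn fc := by
  cases h : conn.get? "service" <;>
    simp [pvStage, pvSrcs, pvChain, pvAlways, pvA2, h, PySem.Dict.getD_eq_get?_getD]
lemma pvL3 (conn fc : PySem.Dict String String) : pvStage conn "name" fc = pvA3 conn fc := by
  cases h1 : conn.get? "name" <;> cases h2 : conn.get? "interface" <;>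
    simp [pvStage, pvSrcs, pvChain, pvAlways, pvA3, h1, h2]
lemma pvL4 (conn fc : PySem.Dict String String) : pvStage conn "uptime" fc = pvA4 conn fc := by
  cases h : conn.get? "uptime" <;> simp [pvStage, pvSrcs, pvChain, pvAlways, pvA4, h]
lemma pvL5 (conn fc : PySem.Dict String String) : pvStage conn "user" fc = pvA5 conn fc := by
  cases h1 : conn.get? "user" <;> cases h2 : conn.get? "username" <;> cases h3 : conn.get? "name" <;>
    simp [pvStage, pvSrcs, pvChain, pvAlways, pvA5, h1, h2, h3]
lemma pvL6 (conn fc : PySem.Dict String String) : pvStage conn "address" fc = pvA6 conn fc := by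
  cases h1 : conn.get? "address" <;> cases h2 : conn.get? "remote-address" <;>
    cases h3 : conn.get? "remote_address" <;>
    simp [pvStage, pvSrcs, pvChain, pvAlways, pvA6, h1, h2, h3]
lemma pvL7 (conn fc : PySem.Dict String String) : pvStage conn "local_address" fc = pvA7 conn fc := by
  cases h1 : conn.get? "local-address" <;> cases h2 : conn.get? "local_address" <;>
    simp [pvStage, pvSrcs, pvChain, pvAlways, pvA7, h1, h2]
lemma pvL8 (conn fc : PySem.Dict String String) : pvStage conn "encoding" fc = pvA8 conn fc := by
  cases h : conn.get? "encoding" <;> simp [pvStage, pvSrcs, pvChain, pvAlways, pvA8, h]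
lemma pvL9 (conn fc : PySem.Dict String String) : pvStage conn "cipher" fc = pvA9 conn fc := by
  cases h : conn.get? "cipher" <;> simp [pvStage, pvSrcs, pvChain, pvAlways, pvA9, h]

lemma pvSeedEq (conn : PySem.Dict String String) :
    pvStage conn "cipher" (pvStage conn "encoding" (pvStage conn "local_address"
      (pvStage conn "address" (pvStage conn "user" (pvStage conn "uptime"
        (pvStage conn "name" (pvStage conn "service" (pvStage conn "type" PySem.Dict.empty)))))))) =
    pvA9 conn (pvA8 conn (pvA7 conn (pvA6 conn (pvA5 conn (pvA4 conn
      (pvA3 conn (pvA2 conn (pvA1 conn PySem.Dict.empty)))))))) := by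
  rw [pvL1, pvL2, pvL3, pvL4, pvL5, pvL6, pvL7, pvL8, pvL9]

lemma pvExtras_fold (l : List (String × String)) (acc : List (String × String))
    (fc : PySem.Dict String String) :
    (l.foldl (fun a kv => if pvSkipA.contains kv.1 then a
        else a ++ [(PySem.Str.replace kv.1 "-" "_", kv.2)]) acc).foldl
        (fun fc kv => fc.insert kv.1 kv.2) fc =
      l.foldl (fun fc kv => if pvSkipA.contains kv.1 then fc
        else fc.insert (PySem.Str.replace kv.1 "-" "_") kv.2)
        (acc.foldl (fun fc kv => fc.insert kv.1 kv.2) fc) := by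
  induction l generalizing acc fc with
  | nil => rfl
  | cons kv rest ih =>
      rw [List.foldl_cons, List.foldl_cons]
      cases hp : pvSkipA.contains kv.1
      · rw [if_neg (by simp), if_neg (by simp), ih,
          List.foldl_append, List.foldl_cons, List.foldl_nil]
      · rw [if_pos rfl, if_pos rfl, ih]

set_option maxHeartbeats 1000000 in
lemma pvFormatOne_eq (l : List (String × String)) :
    pvFormatOneA (PySem.Dict.mk l) = pvFormatOneB (PySem.Dict.mk l) := by
  obtain ⟨hT, hE⟩ := pvInv l
  have e1 := hT "type" (by decide)
  have e2 := hT "service" (by decide)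
  have e3 := hT "name" (by decide)
  have e4 := hT "uptime" (by decide)
  have e5 := hT "user" (by decide)
  have e6 := hT "address" (by decide)
  have e7 := hT "local_address" (by decide)
  have e8 := hT "encoding" (by decide)
  have e9 := hT "cipher" (by decide)
  simp only [pvFormatOneA, pvFormatOneB, pvTargets, List.foldl_cons, List.foldl_nil]
  rw [e1, e2, e3, e4, e5, e6, e7, e8, e9, hE, pvExtras_fold]
  rw [List.foldl_nil]
  congr 1
  exact (pvSeedEq (PySem.Dict.mk l)).symm

theorem format_connections_eq_alt (connections : List (List (String × String))) :
    format_connections connections = format_connections_alt connections := by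
  simp only [format_connections, format_connections_alt, pvFormatOne_eq]

-- ===== VERDICT (by name: the statement is the Claim_ definition above) =====
theorem format_connections_spec : Claim_equal_format_connections := by
  intro connections _
  exact format_connections_eq_alt connections
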